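-- pv_equiv track=rewrite | github.com/SwapnilUkey/Python_Assignment_UOG | 1/“MS5114_Assignment1_Swapnil_Ukey_code.py | sort_last
-- ===== SOURCE A (Python) =====
-- def sort_last(tuples):
--     len_tup = len(tuples)
--     for ith in range(0, len_tup):
--         for jth in range(0, len_tup - ith - 1):
--             if tuples[jth][-1] > tuples[jth + 1][-1]:
--                 temp = tuples[jth]
--                 tuples[jth] = tuples[jth + 1]
--                 tuples[jth + 1] = temp
--     return tuples
-- ===== SOURCE B (Python) =====
-- def sort_last(tuples):
--     # idiomatic: one stable library sort by last element (mutates the same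
--     # list object in place and returns it, like A)
--     tuples[:] = sorted(tuples, key=lambda t: t[-1])
--     return tuples
-- ===== Notes on version B (the rewrite author's own statement) =====
-- stated objective: idiomatic
-- what changed: Replaces the hand-written index-based bubble sort with a single call to Python's built-in stable sorted() keyed on the last element, assigned back in place.
-- outside the precondition, e.g. on sort_last([()]): A returns [()], B raises IndexError
import Mathlib
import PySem

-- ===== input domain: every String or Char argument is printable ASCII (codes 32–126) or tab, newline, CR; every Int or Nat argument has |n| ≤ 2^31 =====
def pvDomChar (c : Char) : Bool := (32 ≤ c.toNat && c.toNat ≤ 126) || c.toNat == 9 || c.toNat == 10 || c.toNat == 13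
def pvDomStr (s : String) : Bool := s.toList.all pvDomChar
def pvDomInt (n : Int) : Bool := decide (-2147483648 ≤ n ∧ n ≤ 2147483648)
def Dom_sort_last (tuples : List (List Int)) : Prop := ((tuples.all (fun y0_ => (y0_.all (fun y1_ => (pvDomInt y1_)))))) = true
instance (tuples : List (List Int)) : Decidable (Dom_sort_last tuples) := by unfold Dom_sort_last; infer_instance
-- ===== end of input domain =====

-- B replaces the hand-written index-based bubble sort by one call to Python's stable
-- built-in sorted() keyed on the last element, assigned back in place (same mutation
-- of the argument list, same return value).


-- ===== PORT A =====
def sort_last (tuples : List (List Int)) : List (List Int) :=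
  let len_tup : Int := tuples.length
  (PySem.List.pyRange 0 len_tup 1).foldl (fun xs ith =>
    (PySem.List.pyRange 0 (len_tup - ith - 1) 1).foldl (fun xs jth =>
      if PySem.List.pyGetD (PySem.List.pyGetD xs jth []) (-1) 0 >
         PySem.List.pyGetD (PySem.List.pyGetD xs (jth + 1) []) (-1) 0 then
        let temp := PySem.List.pyGetD xs jth []
        let xs' := PySem.List.pySetD xs jth (PySem.List.pyGetD xs (jth + 1) [])
        PySem.List.pySetD xs' (jth + 1) temp
      else xs) xs) tuples

-- ===== PORT B =====
def sort_last_alt (tuples : List (List Int)) : List (List Int) :=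
  PySem.List.sorted tuples (fun t => PySem.List.pyGetD t (-1) 0) false

-- ===== PRECONDITION & SPEC =====
-- Pre_ excludes inputs containing an empty inner list: on those Python raises an
-- IndexError at the last-element lookup — A in its comparison whenever the outer list
-- has two or more elements, and B in its sort key even for a one-element input on
-- which A still returns (see the cite in claim.json).
def Pre_sort_last (tuples : List (List Int)) : Prop := ∀ t ∈ tuples, t ≠ []
instance (tuples : List (List Int)) : Decidable (Pre_sort_last tuples) := by unfold Pre_sort_last; infer_instance
def pvWitness_sort_last : List (List Int) := [[3], [1, 2], [2]]
def Spec_sort_last (tuples : List (List Int)) (out : List (List Int)) : Prop := out = sort_last_alt tuples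
instance (tuples : List (List Int)) (out : List (List Int)) : Decidable (Spec_sort_last tuples out) := by unfold Spec_sort_last; infer_instance

-- ===== CLAIM (what is proved, stated in full; the proofs are below) =====
def Claim_equal_sort_last : Prop := ∀ (tuples : List (List Int)), Dom_sort_last tuples → Pre_sort_last tuples → Spec_sort_last tuples (sort_last tuples)

-- ===== LEMMAS AND PROOFS =====

-- the key A compares on: the last element (total form; indices A uses are in range)
def kf (t : List Int) : Int := PySem.List.pyGetD t (-1) 0

-- A's inner-loop body, named so the loop lemmas can speak about it (same lambda as the port)
def ibody (xs : List (List Int)) (jth : Int) : List (List Int) :=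
  if PySem.List.pyGetD (PySem.List.pyGetD xs jth []) (-1) 0 >
     PySem.List.pyGetD (PySem.List.pyGetD xs (jth + 1) []) (-1) 0 then
    let temp := PySem.List.pyGetD xs jth []
    let xs' := PySem.List.pySetD xs jth (PySem.List.pyGetD xs (jth + 1) [])
    PySem.List.pySetD xs' (jth + 1) temp
  else xs

-- one bubble pass limited to m comparisons (touches only the first m+1 positions)
def bpN {α κ : Type} [LinearOrder κ] (k : α → κ) : Nat → List α → List α
  | 0, l => l
  | _ + 1, [] => []
  | _ + 1, [x] => [x]
  | m + 1, x :: y :: t => if k y < k x then y :: bpN k m (x :: t) else x :: bpN k m (y :: t)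

-- A's outer loop: passes with m = n-1, n-2, …, 0
def passes {α κ : Type} [LinearOrder κ] (k : α → κ) : Nat → List α → List α
  | 0, l => l
  | i + 1, l => passes k i (bpN k i l)

-- index-decorated key: stability of the bubble sort is strict sortedness under this key
def decKey {α κ : Type} [LinearOrder κ] (k : α → κ) (p : α × Nat) : Lex (κ × Nat) :=
  toLex (k p.1, p.2)

-- equal-key elements appear in index order
def IncEq {α κ : Type} [LinearOrder κ] (k : α → κ) (dl : List (α × Nat)) : Prop :=
  dl.Pairwise (fun p q => k p.1 = k q.1 → p.2 < q.2)

lemma bpN_perm {α κ : Type} [LinearOrder κ] (k : α → κ) :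
    ∀ (m : Nat) (l : List α), (bpN k m l).Perm l := by
  intro m
  induction m with
  | zero => intro l; simp [bpN]
  | succ m ih =>
    intro l
    match l with
    | [] => simp [bpN]
    | [x] => simp [bpN]
    | x :: y :: t =>
      simp only [bpN]
      split_ifs with hc
      · exact ((ih (x :: t)).cons y).trans (List.Perm.swap x y t)
      · exact (ih (y :: t)).cons x

lemma bpN_length {α κ : Type} [LinearOrder κ] (k : α → κ) (m : Nat) (l : List α) :
    (bpN k m l).length = l.length := (bpN_perm k m l).length_eq

lemma bpN_drop {α κ : Type} [LinearOrder κ] (k : α → κ) :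
    ∀ (m : Nat) (l : List α), (bpN k m l).drop (m + 1) = l.drop (m + 1) := by
  intro m
  induction m with
  | zero => intro l; rfl
  | succ m ih =>
    intro l
    match l with
    | [] => simp [bpN]
    | [x] => simp [bpN]
    | x :: y :: t =>
      simp only [bpN]
      split_ifs with hc
      · simpa [List.drop_succ_cons] using ih (x :: t)
      · simpa [List.drop_succ_cons] using ih (y :: t)

lemma bpN_take_perm {α κ : Type} [LinearOrder κ] (k : α → κ) (m : Nat) (l : List α) :
    ((bpN k m l).take (m + 1)).Perm (l.take (m + 1)) := by
  have h := bpN_perm k m l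
  have e1 : (bpN k m l).take (m + 1) ++ l.drop (m + 1) = bpN k m l := by
    rw [← bpN_drop k m l]; exact List.take_append_drop _ _
  have h2 : ((bpN k m l).take (m + 1) ++ l.drop (m + 1)).Perm
      (l.take (m + 1) ++ l.drop (m + 1)) := by
    rw [e1, List.take_append_drop]; exact h
  exact (List.perm_append_right_iff _).mp h2

lemma bpN_max {α κ : Type} [LinearOrder κ] (k : α → κ) :
    ∀ (m : Nat) (l : List α), m + 1 ≤ l.length →
      ∃ z, (bpN k m l).drop m = z :: l.drop (m + 1) ∧ z ∈ l.take (m + 1) ∧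
        ∀ x ∈ l.take (m + 1), k x ≤ k z := by
  intro m
  induction m with
  | zero =>
    intro l h
    match l, h with
    | w :: t, _ => exact ⟨w, by simp [bpN], by simp, by simp⟩
  | succ m ih =>
    intro l h
    match l, h with
    | [x], h => simp at h
    | x :: y :: t, h =>
      simp only [bpN]
      split_ifs with hc
      · obtain ⟨z, hz1, hz2, hz3⟩ := ih (x :: t) (by simp at h ⊢; omega)
        refine ⟨z, ?_, ?_, ?_⟩
        · simpa [List.drop_succ_cons] using hz1
        · simp only [List.take_succ_cons, List.mem_cons] at hz2 ⊢; tauto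
        · intro w hw
          simp only [List.take_succ_cons, List.mem_cons] at hw
          have hx : k x ≤ k z := hz3 x (by simp)
          rcases hw with rfl | rfl | hw
          · exact hx
          · exact le_trans (le_of_lt hc) hx
          · exact hz3 w (by simp [List.take_succ_cons]; tauto)
      · obtain ⟨z, hz1, hz2, hz3⟩ := ih (y :: t) (by simp at h ⊢; omega)
        refine ⟨z, ?_, ?_, ?_⟩
        · simpa [List.drop_succ_cons] using hz1
        · simp only [List.take_succ_cons, List.mem_cons] at hz2 ⊢; tauto
        · intro w hw
          simp only [List.take_succ_cons, List.mem_cons] at hw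
          have hy : k y ≤ k z := hz3 y (by simp)
          rcases hw with rfl | rfl | hw
          · exact le_trans (not_lt.mp hc) hy
          · exact hy
          · exact hz3 w (by simp [List.take_succ_cons]; tauto)

lemma passes_sorted {α κ : Type} [LinearOrder κ] (k : α → κ) :
    ∀ (i : Nat) (l : List α), i ≤ l.length →
      (∀ x ∈ l.take i, ∀ y ∈ l.drop i, k x ≤ k y) →
      (l.drop i).Pairwise (fun a b => k a ≤ k b) →
      (passes k i l).Pairwise (fun a b => k a ≤ k b) ∧ (passes k i l).Perm l := by
  intro i
  induction i with
  | zero =>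
    intro l _ _ h2
    exact ⟨by simpa using h2, List.Perm.refl l⟩
  | succ i ih =>
    intro l h h1 h2
    obtain ⟨z, hd, hzmem, hzmax⟩ := bpN_max k i l (by omega)
    have hlen' : (bpN k i l).length = l.length := bpN_length k i l
    have hperm' : (bpN k i l).Perm l := bpN_perm k i l
    have htk : ∀ x ∈ (bpN k i l).take i, x ∈ l.take (i + 1) := by
      intro x hx
      have hx' : x ∈ (bpN k i l).take (i + 1) := by
        have e : (bpN k i l).take i = ((bpN k i l).take (i + 1)).take i := by
          rw [List.take_take]; simp
        rw [e] at hx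
        exact List.mem_of_mem_take hx
      exact (bpN_take_perm k i l).mem_iff.mp hx'
    have h1' : ∀ x ∈ (bpN k i l).take i, ∀ y ∈ (bpN k i l).drop i, k x ≤ k y := by
      intro x hx y hy
      rw [hd] at hy
      rcases List.mem_cons.mp hy with rfl | hy
      · exact hzmax x (htk x hx)
      · exact h1 x (htk x hx) y hy
    have h2' : ((bpN k i l).drop i).Pairwise (fun a b => k a ≤ k b) := by
      rw [hd]
      exact List.Pairwise.cons (fun y hy => h1 z hzmem y hy) h2
    obtain ⟨hp, hq⟩ := ih (bpN k i l) (by omega) h1' h2'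
    exact ⟨hp, hq.trans hperm'⟩

lemma decKey_lt_iff {α κ : Type} [LinearOrder κ] (k : α → κ) (p q : α × Nat)
    (hpq : k p.1 = k q.1 → p.2 < q.2) :
    decKey k q < decKey k p ↔ k q.1 < k p.1 := by
  constructor
  · intro h
    rw [decKey, decKey, Prod.Lex.lt_iff] at h
    simp only [ofLex_toLex] at h
    rcases h with h | ⟨he, hl⟩
    · exact h
    · exact absurd (hpq he.symm) (by omega)
  · intro h
    rw [decKey, decKey, Prod.Lex.lt_iff]
    simp only [ofLex_toLex]
    exact Or.inl h

lemma bpN_sim {α κ : Type} [LinearOrder κ] (k : α → κ) :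
    ∀ (m : Nat) (dl : List (α × Nat)), IncEq k dl →
      (bpN (decKey k) m dl).map Prod.fst = bpN k m (dl.map Prod.fst) ∧
      IncEq k (bpN (decKey k) m dl) := by
  intro m
  induction m with
  | zero => intro dl hinc; exact ⟨rfl, hinc⟩
  | succ m ih =>
    intro dl hinc
    match dl with
    | [] => exact ⟨by simp [bpN], by simp [bpN, IncEq]⟩
    | [p] => exact ⟨by simp [bpN], by simp [bpN, IncEq]⟩
    | p :: q :: t =>
      rw [IncEq, List.pairwise_cons, List.pairwise_cons] at hinc
      obtain ⟨hp, hq, ht⟩ := hinc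
      have hcond : (decKey k q < decKey k p) ↔ (k q.1 < k p.1) :=
        decKey_lt_iff k p q (hp q (by simp))
      simp only [bpN, List.map_cons]
      by_cases hc : k q.1 < k p.1
      · rw [if_pos (hcond.mpr hc), if_pos hc]
        have hinc' : IncEq k (p :: t) := by
          rw [IncEq, List.pairwise_cons]
          exact ⟨fun y hy => hp y (by simp [hy]), ht⟩
        obtain ⟨hm, hi⟩ := ih (p :: t) hinc'
        refine ⟨by simp [hm], ?_⟩
        rw [IncEq, List.pairwise_cons]
        refine ⟨?_, hi⟩
        intro y hy
        have hmem : y ∈ p :: t := (bpN_perm (decKey k) m (p :: t)).mem_iff.mp hy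
        rcases List.mem_cons.mp hmem with rfl | hmem
        · exact fun he => absurd he (ne_of_lt hc)
        · exact hq y hmem
      · rw [if_neg (fun h => hc (hcond.mp h)), if_neg hc]
        have hinc' : IncEq k (q :: t) := by rw [IncEq, List.pairwise_cons]; exact ⟨hq, ht⟩
        obtain ⟨hm, hi⟩ := ih (q :: t) hinc'
        refine ⟨by simp [hm], ?_⟩
        rw [IncEq, List.pairwise_cons]
        refine ⟨?_, hi⟩
        intro y hy
        have hmem : y ∈ q :: t := (bpN_perm (decKey k) m (q :: t)).mem_iff.mp hy
        exact hp y hmem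

lemma passes_sim {α κ : Type} [LinearOrder κ] (k : α → κ) :
    ∀ (i : Nat) (dl : List (α × Nat)), IncEq k dl →
      (passes (decKey k) i dl).map Prod.fst = passes k i (dl.map Prod.fst) := by
  intro i
  induction i with
  | zero => intro dl _; rfl
  | succ i ih =>
    intro dl hinc
    simp only [passes]
    obtain ⟨hm, hi⟩ := bpN_sim k i dl hinc
    rw [← hm]
    exact ih _ hi

lemma insertBy_sim {α κ : Type} [LinearOrder κ] (k : α → κ) (x : α × Nat) :
    ∀ (acc : List (α × Nat)), (∀ y ∈ acc, y.2 < x.2) →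
      (PySem.List.insertBy (fun a b => decide (decKey k a < decKey k b)) x acc).map Prod.fst
        = PySem.List.insertBy (fun a b => decide (k a < k b)) x.1 (acc.map Prod.fst) := by
  intro acc
  induction acc with
  | nil => intro _; simp [PySem.List.insertBy]
  | cons y ys ih =>
    intro h
    have hcond : (decKey k x < decKey k y) ↔ (k x.1 < k y.1) :=
      decKey_lt_iff k y x (fun _ => h y (by simp))
    simp only [PySem.List.insertBy, List.map_cons]
    by_cases hc : k x.1 < k y.1
    · rw [if_pos (by simpa using hcond.mpr hc), if_pos (by simpa using hc)]
      simp
    · rw [if_neg (by simpa using fun hh => hc (hcond.mp hh)), if_neg (by simpa using hc)]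
      simp only [List.map_cons]
      rw [ih (fun z hz => h z (by simp [hz]))]

lemma foldl_insertBy_sim {α κ : Type} [LinearOrder κ] (k : α → κ) :
    ∀ (dl acc : List (α × Nat)), dl.Pairwise (fun p q => p.2 < q.2) →
      (∀ y ∈ acc, ∀ x ∈ dl, y.2 < x.2) →
      (dl.foldl (fun a x => PySem.List.insertBy (fun a b => decide (decKey k a < decKey k b)) x a) acc).map Prod.fst
        = (dl.map Prod.fst).foldl (fun a x => PySem.List.insertBy (fun a b => decide (k a < k b)) x a) (acc.map Prod.fst) := by
  intro dl
  induction dl with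
  | nil => intro acc _ _; rfl
  | cons x rest ih =>
    intro acc hpw hacc
    rw [List.pairwise_cons] at hpw
    simp only [List.foldl_cons, List.map_cons]
    have hm : (PySem.List.insertBy (fun a b => decide (decKey k a < decKey k b)) x acc).map Prod.fst
        = PySem.List.insertBy (fun a b => decide (k a < k b)) x.1 (acc.map Prod.fst) :=
      insertBy_sim k x acc (fun y hy => hacc y hy x (by simp))
    rw [← hm]
    refine ih _ hpw.2 ?_
    intro y hy x' hx'
    rcases (PySem.List.mem_insertBy _ x y acc).mp hy with rfl | hy
    · exact hpw.1 x' hx'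
    · exact hacc y hy x' (by simp [hx'])

lemma sorted_sim {α κ : Type} [LinearOrder κ] (k : α → κ) (dl : List (α × Nat))
    (h : dl.Pairwise (fun p q => p.2 < q.2)) :
    (PySem.List.sorted dl (decKey k) false).map Prod.fst
      = PySem.List.sorted (dl.map Prod.fst) k false := by
  rw [PySem.List.sorted_eq_foldl_insertBy, PySem.List.sorted_eq_foldl_insertBy]
  exact foldl_insertBy_sim k dl [] h (by simp)

-- the decorated bubble sort and the decorated insertion sort coincide (both are the
-- unique strictly-decKey-sorted permutation, since indices are distinct)
lemma passes_eq_sorted_dec {α κ : Type} [LinearOrder κ] (k : α → κ) (dl : List (α × Nat))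
    (hnd : (dl.map Prod.snd).Nodup) :
    passes (decKey k) dl.length dl = PySem.List.sorted dl (decKey k) false := by
  have hs := passes_sorted (decKey k) dl.length dl (le_refl _)
    (by intro x _ y hy; rw [List.drop_length] at hy; simp at hy)
    (by rw [List.drop_length]; exact List.Pairwise.nil)
  have hsor := PySem.List.sorted_pairwise dl (decKey k)
  have hsp : (PySem.List.sorted dl (decKey k) false).Perm dl :=
    PySem.List.sorted_perm dl (decKey k) false
  refine List.Perm.eq_of_pairwise ?_ hs.1 hsor (hs.2.trans hsp.symm)
  intro a b ha hb hab hba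
  have haa : a ∈ dl := hs.2.mem_iff.mp ha
  have hbb : b ∈ dl := hsp.mem_iff.mp hb
  have he : decKey k a = decKey k b := le_antisymm hab hba
  have hpair : (k a.1, a.2) = (k b.1, b.2) := congrArg ofLex he
  have h2 : a.2 = b.2 := (Prod.ext_iff.mp hpair).2
  exact List.inj_on_of_nodup_map hnd haa hbb h2

-- evaluation of A's inner body at a valid index
lemma ibody_eval (pre : List (List Int)) (x y : List Int) (t : List (List Int)) :
    ibody (pre ++ x :: y :: t) (pre.length : Int)
      = pre ++ (if kf y < kf x then y :: x :: t else x :: y :: t) := by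
  have h1 : PySem.List.pyGetD (pre ++ x :: y :: t) (pre.length : Int) [] = x := by
    rw [PySem.List.pyGetD_natCast, List.getD_append_right _ _ _ _ (le_refl _)]
    simp
  have hcast : ((pre.length : Int) + 1) = ((pre.length + 1 : Nat) : Int) := by push_cast; ring
  have h3 : PySem.List.pyGetD (pre ++ x :: y :: t) ((pre.length : Int) + 1) [] = y := by
    rw [hcast, PySem.List.pyGetD_natCast, List.getD_append_right _ _ _ _ (by omega)]
    simp
  have s1 : (pre ++ x :: y :: t).set pre.length y = pre ++ y :: y :: t := by
    rw [List.set_append_right _ _ (le_refl _), Nat.sub_self]; rfl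
  have s2 : (pre ++ y :: y :: t).set (pre.length + 1) x = pre ++ y :: x :: t := by
    rw [List.set_append_right _ _ (by omega), Nat.add_sub_cancel_left]; rfl
  rw [ibody, h1, h3]
  simp only [gt_iff_lt, kf]
  split_ifs with hc
  · simp only [hcast, PySem.List.pySetD_natCast, s1, s2]
  · rfl

lemma inner_pass : ∀ (m : Nat) (pre suf : List (List Int)), m + 1 ≤ suf.length →
    (PySem.List.pyRange (pre.length : Int) ((pre.length : Int) + m) 1).foldl ibody (pre ++ suf)
      = pre ++ bpN kf m suf := by
  intro m
  induction m with
  | zero =>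
    intro pre suf _
    rw [show ((pre.length : Int) + ((0 : Nat) : Int)) = (pre.length : Int) by simp,
      PySem.List.pyRange_one_eq_nil (le_refl _)]
    rfl
  | succ m ih =>
    intro pre suf h
    match suf, h with
    | x :: y :: t, h =>
      rw [PySem.List.pyRange_one_cons (by push_cast; omega), List.foldl_cons, ibody_eval]
      by_cases hc : kf y < kf x
      · rw [if_pos hc]
        have e1 : pre ++ y :: x :: t = (pre ++ [y]) ++ x :: t := by simp
        have e2 : ((pre.length : Int) + 1) = ((pre ++ [y]).length : Int) := by
          push_cast [List.length_append, List.length_cons, List.length_nil]; ring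
        have e3 : ((pre.length : Int) + ((m + 1 : Nat) : Int)) = (((pre ++ [y]).length : Int) + ((m : Nat) : Int)) := by
          push_cast [List.length_append, List.length_cons, List.length_nil]; ring
        rw [e1, e2, e3, ih (pre ++ [y]) (x :: t) (by simp only [List.length_cons] at h ⊢; omega)]
        simp [bpN, if_pos hc]
      · rw [if_neg hc]
        have e1 : pre ++ x :: y :: t = (pre ++ [x]) ++ y :: t := by simp
        have e2 : ((pre.length : Int) + 1) = ((pre ++ [x]).length : Int) := by
          push_cast [List.length_append, List.length_cons, List.length_nil]; ring
        have e3 : ((pre.length : Int) + ((m + 1 : Nat) : Int)) = (((pre ++ [x]).length : Int) + ((m : Nat) : Int)) := by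
          push_cast [List.length_append, List.length_cons, List.length_nil]; ring
        rw [e1, e2, e3, ih (pre ++ [x]) (y :: t) (by simp only [List.length_cons] at h ⊢; omega)]
        simp [bpN, if_neg hc]

lemma outer_loop (n : Nat) : ∀ (i : Nat) (l : List (List Int)), l.length = n → i ≤ n →
    (PySem.List.pyRange ((n : Int) - i) (n : Int) 1).foldl
        (fun xs ith => (PySem.List.pyRange 0 ((n : Int) - ith - 1) 1).foldl ibody xs) l
      = passes kf i l := by
  intro i
  induction i with
  | zero =>
    intro l _ _
    rw [PySem.List.pyRange_one_eq_nil (by push_cast; omega)]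
    rfl
  | succ i ih =>
    intro l hl hle
    rw [PySem.List.pyRange_one_cons (by push_cast; omega), List.foldl_cons]
    have e2 : ((n : Int) - ((n : Int) - ((i + 1 : Nat) : Int)) - 1) = ((i : Nat) : Int) := by
      push_cast; ring
    rw [e2]
    have hinner : (PySem.List.pyRange 0 ((i : Nat) : Int) 1).foldl ibody l = bpN kf i l := by
      have := inner_pass i [] l (by omega)
      simpa using this
    rw [hinner]
    have e3 : ((n : Int) - ((i + 1 : Nat) : Int) + 1) = ((n : Int) - ((i : Nat) : Int)) := by
      push_cast; ring
    rw [e3, ih (bpN kf i l) (by rw [bpN_length]; exact hl) (by omega)]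
    rfl

lemma sortA_eq_passes (l : List (List Int)) : sort_last l = passes kf l.length l := by
  have h0 : sort_last l
      = (PySem.List.pyRange 0 ((l.length : Nat) : Int) 1).foldl
          (fun xs ith => (PySem.List.pyRange 0 (((l.length : Nat) : Int) - ith - 1) 1).foldl ibody xs) l := rfl
  have h := outer_loop l.length l.length l rfl (le_refl _)
  rw [sub_self] at h
  exact h0.trans h

-- ===== VERDICT (by name: the statement is the Claim_ definition above) =====
theorem sort_last_spec : Claim_equal_sort_last := by
  intro l _ _
  unfold Spec_sort_last
  have hfst : l.zipIdx.map Prod.fst = l := List.zipIdx_map_fst 0 l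
  have hsnd : l.zipIdx.map Prod.snd = List.range' 0 l.length := List.zipIdx_map_snd 0 l
  have hnd : (l.zipIdx.map Prod.snd).Nodup := by
    rw [hsnd]; exact List.nodup_range'
  have hlt : l.zipIdx.Pairwise (fun p q => p.2 < q.2) := by
    have hpw : (l.zipIdx.map Prod.snd).Pairwise (· < ·) := by
      rw [hsnd]; exact List.pairwise_lt_range' ..
    exact (List.pairwise_map.mp hpw)
  have hinc : IncEq kf l.zipIdx := by
    unfold IncEq
    refine List.Pairwise.imp ?_ hlt
    intro p q h _
    exact h
  have hlen : l.zipIdx.length = l.length := List.length_zipIdx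
  calc sort_last l = passes kf l.length l := sortA_eq_passes l
    _ = passes kf l.zipIdx.length (l.zipIdx.map Prod.fst) := by rw [hfst, hlen]
    _ = (passes (decKey kf) l.zipIdx.length l.zipIdx).map Prod.fst :=
        (passes_sim kf l.zipIdx.length l.zipIdx hinc).symm
    _ = (PySem.List.sorted l.zipIdx (decKey kf) false).map Prod.fst := by
        rw [passes_eq_sorted_dec kf l.zipIdx hnd]
    _ = PySem.List.sorted (l.zipIdx.map Prod.fst) kf false := sorted_sim kf l.zipIdx hlt
    _ = sort_last_alt l := by rw [hfst]; rfl
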